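-- pv_equiv track=rewrite | github.com/posl/comment_recommendation | script/mod_gen/2_time/en/282_C/9.py | replace_comma
-- ===== SOURCE A (Python) =====
-- def replace_comma(str):
--     count = 0
--     new_str = ""
--     for i in str:
--         if i == '"':
--             count += 1
--         elif i == ',' and count % 2 == 0:
--             new_str += '.'
--         else:
--             new_str += i
--     return new_str
-- ===== SOURCE B (Python) =====
-- def replace_comma(str):
--     parts = str.split('"')
--     return ''.join(p.replace(',', '.') if i % 2 == 0 else p
--                    for i, p in enumerate(parts))
-- ===== Notes on version B (the rewrite author's own statement) =====
-- stated objective: idiomatic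
-- what changed: Replaces the per-character loop with quote-parity counter by split-on-quote, comma-to-dot replacement on even-indexed (outside-quote) segments, and a join.
import Mathlib
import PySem

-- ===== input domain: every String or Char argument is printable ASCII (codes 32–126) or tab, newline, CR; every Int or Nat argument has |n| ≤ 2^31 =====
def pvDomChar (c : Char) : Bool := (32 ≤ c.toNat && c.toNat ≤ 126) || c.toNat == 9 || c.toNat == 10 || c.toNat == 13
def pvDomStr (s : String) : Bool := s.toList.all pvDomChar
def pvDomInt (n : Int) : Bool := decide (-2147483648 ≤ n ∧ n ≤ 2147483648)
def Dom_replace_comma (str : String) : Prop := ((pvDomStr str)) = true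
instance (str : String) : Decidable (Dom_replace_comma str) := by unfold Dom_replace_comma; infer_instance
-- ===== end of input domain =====

-- B replaces A's per-character loop with a quote-parity counter by split-on-quote,
-- comma→dot replacement on even-indexed (outside-quote) segments, and a join (objective: idiomatic).

-- ===== PORT A =====
def replace_comma (str : String) : String :=
  (str.toList.foldl
    (fun (st : Int × String) i =>
      if i == '"' then (st.1 + 1, st.2)
      else if i == ',' && PySem.Int.mod st.1 2 == 0 then (st.1, st.2 ++ ".")
      else (st.1, st.2.push i))
    (0, "")).2

-- ===== PORT B =====
-- hand port of str.split('"'): exact for a single-character, non-empty separator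
def splitQuote : List Char → List (List Char)
  | [] => [[]]
  | c :: t =>
    if c == '"' then [] :: splitQuote t
    else
      match splitQuote t with
      | [] => [[c]]
      | h :: r => (c :: h) :: r

-- hand port of p.replace(',', '.'): exact, since old and new are single characters
def replCommas (p : List Char) : List Char :=
  p.map (fun c => if c == ',' then '.' else c)

def replace_comma_alt (str : String) : String :=
  let parts := splitQuote str.toList
  String.ofList
    (((PySem.List.enumerate parts).map
        (fun ip => if PySem.Int.mod ip.1 2 == 0 then replCommas ip.2 else ip.2)).flatten)

-- ===== PRECONDITION & SPEC =====
def Spec_replace_comma (str : String) (out : String) : Prop := out = replace_comma_alt str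
instance (str : String) (out : String) : Decidable (Spec_replace_comma str out) := by unfold Spec_replace_comma; infer_instance

-- ===== CLAIM (what is proved, stated in full; the proofs are below) =====
def Claim_equal_replace_comma : Prop := ∀ (str : String), Dom_replace_comma str → Spec_replace_comma str (replace_comma str)

-- ===== LEMMAS AND PROOFS =====

-- characterisation of A's loop body output, parity of the quote count as a Bool
def emitA : List Char → Bool → List Char
  | [], _ => []
  | i :: t, ev =>
    if i == '"' then emitA t (!ev)
    else if i == ',' && ev then '.' :: emitA t ev
    else i :: emitA t ev

-- characterisation of B's enumerate/map/flatten, parity of the segment index as a Bool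
def joinP : List (List Char) → Bool → List Char
  | [], _ => []
  | h :: r, ev => (if ev then replCommas h else h) ++ joinP r (!ev)

theorem mod2_succ (c : Int) :
    (PySem.Int.mod (c + 1) 2 == 0) = !(PySem.Int.mod c 2 == 0) := by
  rw [PySem.Int.mod_eq_emod_of_pos (by norm_num : (0:Int) < 2),
      PySem.Int.mod_eq_emod_of_pos (by norm_num : (0:Int) < 2)]
  rcases Int.emod_two_eq c with h | h
  · have h1 : (c + 1) % 2 = 1 := by omega
    simp [h, h1]
  · have h1 : (c + 1) % 2 = 0 := by omega
    simp [h, h1]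

theorem foldA_eq (l : List Char) (c : Int) (acc : String) :
    ((l.foldl
        (fun (st : Int × String) i =>
          if i == '"' then (st.1 + 1, st.2)
          else if i == ',' && PySem.Int.mod st.1 2 == 0 then (st.1, st.2 ++ ".")
          else (st.1, st.2.push i))
        (c, acc)).2).toList
      = acc.toList ++ emitA l (PySem.Int.mod c 2 == 0) := by
  induction l generalizing c acc with
  | nil => simp [emitA]
  | cons i t ih =>
    by_cases hq : (i == '"') = true
    · rw [List.foldl_cons]
      simp only [hq, if_true]
      rw [ih, mod2_succ]
      simp only [emitA, hq, if_true]
    · by_cases hc : (i == ',' && PySem.Int.mod c 2 == 0) = true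
      · rw [Bool.and_eq_true] at hc
        obtain ⟨h1, h2⟩ := hc
        rw [List.foldl_cons]
        simp only [hq, Bool.false_eq_true, if_false, h1, h2, Bool.and_self, if_true]
        rw [ih, h2]
        simp only [emitA, hq, Bool.false_eq_true, if_false, h1, h2, Bool.and_true,
          if_true, String.toList_append]
        simp
      · rw [List.foldl_cons]
        simp only [hq, Bool.false_eq_true, if_false, hc, if_false]
        rw [ih]
        simp only [emitA, hq, Bool.false_eq_true, if_false, hc, if_false,
          String.toList_push]
        simp

theorem splitQuote_ne_nil (l : List Char) : splitQuote l ≠ [] := by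
  cases l with
  | nil => simp [splitQuote]
  | cons c t =>
    simp only [splitQuote]
    split
    · simp
    · cases h : splitQuote t <;> simp

theorem emitA_eq_joinP (l : List Char) (ev : Bool) :
    emitA l ev = joinP (splitQuote l) ev := by
  induction l generalizing ev with
  | nil => cases ev <;> simp [emitA, splitQuote, joinP, replCommas]
  | cons c t ih =>
    by_cases hq : c == '"'
    · simp only [emitA, splitQuote, hq, if_pos, joinP]
      rw [ih]
      cases ev <;> simp [replCommas]
    · cases hsp : splitQuote t with
      | nil => exact absurd hsp (splitQuote_ne_nil t)
      | cons h r =>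
        have hjoin : joinP (splitQuote (c :: t)) ev
            = (if ev then (if c == ',' then '.' else c) else c) :: joinP (h :: r) ev := by
          simp only [splitQuote, hq, Bool.false_eq_true, if_false, hsp, joinP, replCommas,
            List.map_cons]
          cases ev <;> simp [joinP, replCommas]
        rw [hjoin, ← hsp, ← ih]
        simp only [emitA, hq, Bool.false_eq_true, if_false]
        by_cases hc : c == ','
        · have : c = ',' := by simpa using hc
          cases ev <;> simp [this]
        · have : ¬ c = ',' := by simpa using hc
          cases ev <;> simp [this]

theorem nat_mod2_succ (k : Nat) : ((k + 1) % 2 == 0) = !(k % 2 == 0) := by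
  rcases Nat.mod_two_eq_zero_or_one k with h | h
  · have h1 : (k + 1) % 2 = 1 := by omega
    simp [h, h1]
  · have h1 : (k + 1) % 2 = 0 := by omega
    simp [h, h1]

theorem enum_eq_joinP (segs : List (List Char)) (k : Nat) :
    ((PySem.List.enumerate segs (k : Int)).map
        (fun ip => if PySem.Int.mod ip.1 2 == 0 then replCommas ip.2 else ip.2)).flatten
      = joinP segs (k % 2 == 0) := by
  induction segs generalizing k with
  | nil => simp [PySem.List.enumerate_nil, joinP]
  | cons h r ih =>
    rw [PySem.List.enumerate_cons]
    have hcast : ((k : Int) + 1) = ((k + 1 : Nat) : Int) := by push_cast; ring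
    have hmod : (PySem.Int.mod (k : Int) 2 == 0) = (k % 2 == 0) := by
      have := PySem.Int.mod_natCast k 2
      rw [show ((2 : Nat) : Int) = 2 by norm_num] at this
      rw [this]
      cases h2 : (k % 2 == 0)
      · have : k % 2 ≠ 0 := by simpa using h2
        simp [h2]
        omega
      · have : k % 2 = 0 := by simpa using h2
        simp [h2, this]
    rw [List.map_cons, List.flatten_cons, hcast, ih, joinP, hmod, nat_mod2_succ]

-- ===== VERDICT (by name: the statement is the Claim_ definition above) =====
theorem replace_comma_spec : Claim_equal_replace_comma := by
  intro str _
  unfold Spec_replace_comma replace_comma replace_comma_alt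
  rw [← String.toList_inj]
  rw [foldA_eq]
  have h0 : (PySem.Int.mod 0 2 == 0) = true := by decide
  rw [h0]
  have := enum_eq_joinP (splitQuote str.toList) 0
  rw [show ((0 : Nat) : Int) = 0 by norm_num] at this
  simp only [String.toList_ofList]
  rw [this]
  simpa using (emitA_eq_joinP str.toList true)
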